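-- pv_equiv track=rewrite | github.com/tajwinder-singh/tajstack-ai-control-layer | main_logic.py | dedupe_substrings
-- ===== SOURCE A (Python) =====
-- def dedupe_substrings(chunks):
--     """
--     Removes chunk A if its entire text appears inside chunk B.
--     Preserves overlapping chunks where neither is a full substring of the other.
--     """
--     final = []
--     for i, c1 in enumerate(chunks):
--         text1 = c1.split("\n", 1)[1].strip() if "\n" in c1 else c1
--         keep = True
--         for j, c2 in enumerate(chunks):
--             if i != j:
--                 text2 = c2.split("\n", 1)[1].strip() if "\n" in c2 else c2
--                 if text1 in text2 and len(text1) < len(text2):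
--                     keep = False
--                     break
--         if keep:
--             final.append(c1)
--     return final
-- ===== SOURCE B (Python) =====
-- def dedupe_substrings(chunks):
--     """Same result as A: drop a chunk whose body text is a proper substring of another
--     chunk's body text. Bodies are extracted once, candidate containers are the distinct
--     body texts sorted by decreasing length, and the scan stops at the first candidate
--     no longer than the probe."""
--     def body(c):
--         return c.split("\n", 1)[1].strip() if "\n" in c else c
--     texts = [body(c) for c in chunks]
--     by_len_desc = sorted(set(texts), key=len, reverse=True)
--     out = []
--     for c, t in zip(chunks, texts):
--         contained = False
--         for u in by_len_desc:
--             if len(u) <= len(t):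
--                 break
--             if t in u:
--                 contained = True
--                 break
--         if not contained:
--             out.append(c)
--     return out
-- ===== Notes on version B (the rewrite author's own statement) =====
-- stated objective: faster
-- what changed: B extracts each chunk's body text once up front and, instead of A's inner rescan that re-splits and re-strips every other chunk per candidate, checks containment against the distinct body texts sorted by decreasing length, stopping as soon as the remaining candidates are no longer than the probe.
import Mathlib
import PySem

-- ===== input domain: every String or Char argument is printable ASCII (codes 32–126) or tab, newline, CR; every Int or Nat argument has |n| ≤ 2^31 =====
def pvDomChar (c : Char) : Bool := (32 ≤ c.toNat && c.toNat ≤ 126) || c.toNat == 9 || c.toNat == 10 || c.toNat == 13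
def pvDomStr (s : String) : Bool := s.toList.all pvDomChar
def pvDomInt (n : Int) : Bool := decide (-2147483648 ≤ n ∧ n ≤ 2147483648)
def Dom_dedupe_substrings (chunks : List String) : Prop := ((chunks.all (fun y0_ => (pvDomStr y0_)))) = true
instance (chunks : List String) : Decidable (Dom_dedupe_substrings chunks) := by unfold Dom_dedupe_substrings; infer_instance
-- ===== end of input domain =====

-- B replaces A's quadratic rescan (re-extracting every body text in the inner loop) by a
-- one-pass body extraction plus a scan over the distinct texts sorted by decreasing length
-- with an early stop; return value proved identical on all inputs.

-- body text of a chunk: c.split("\n", 1)[1].strip() if "\n" in c else c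
-- (the list defaults in pyGetD are unreachable: with "\n" in c the split has two pieces)
def pvBody (c : String) : String :=
  if PySem.Str.isIn "\n" c then
    PySem.Str.strip (PySem.List.pyGetD ((PySem.Str.splitMax? c "\n" 1).getD []) 1 "")
  else c

-- ===== PORT A =====
-- inner 'for j, c2 in enumerate(chunks): … break' loop; returns the final value of 'keep'
def dedupeKeepA (i : Int) (t1 : String) : List (Int × String) → Bool
  | [] => true
  | (j, c2) :: rest =>
    if i ≠ j then
      let t2 := pvBody c2
      if PySem.Str.isIn t1 t2 && decide (PySem.Str.len t1 < PySem.Str.len t2) then false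
      else dedupeKeepA i t1 rest
    else dedupeKeepA i t1 rest

def dedupe_substrings (chunks : List String) : List String :=
  (PySem.List.enumerate chunks).foldl (fun final p =>
    let t1 := pvBody p.2
    if dedupeKeepA p.1 t1 (PySem.List.enumerate chunks) then final ++ [p.2] else final) []

-- ===== PORT B =====
-- inner 'for u in by_len_desc: …' loop of Source B; returns the final value of 'contained'
def dedupeContainedB (t : String) : List String → Bool
  | [] => false
  | u :: rest =>
    if PySem.Str.len u ≤ PySem.Str.len t then false
    else if PySem.Str.isIn t u then true
    else dedupeContainedB t rest

def dedupe_substrings_alt (chunks : List String) : List String :=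
  let texts := chunks.map pvBody
  let byLenDesc := PySem.List.sorted (PySem.Set.ofList texts) (fun u => PySem.Str.len u) true
  (chunks.zip texts).foldl (fun out p =>
    if dedupeContainedB p.2 byLenDesc then out else out ++ [p.1]) []

-- ===== PRECONDITION & SPEC =====
def Spec_dedupe_substrings (chunks : List String) (out : List String) : Prop := out = dedupe_substrings_alt chunks
instance (chunks : List String) (out : List String) : Decidable (Spec_dedupe_substrings chunks out) := by unfold Spec_dedupe_substrings; infer_instance

-- ===== CLAIM (what is proved, stated in full; the proofs are below) =====
def Claim_equal_dedupe_substrings : Prop := ∀ (chunks : List String), Dom_dedupe_substrings chunks → Spec_dedupe_substrings chunks (dedupe_substrings chunks)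

-- ===== LEMMAS AND PROOFS =====

-- the common "drop this chunk" test both programs compute
def pvDrop (chunks : List String) (c : String) : Bool :=
  chunks.any (fun c2 =>
    PySem.Str.isIn (pvBody c) (pvBody c2) && decide (PySem.Str.len (pvBody c) < PySem.Str.len (pvBody c2)))

theorem keepA_iff (i : Int) (t : String) (l : List (Int × String)) :
    dedupeKeepA i t l = true ↔
      ∀ p ∈ l, p.1 ≠ i →
        ¬(PySem.Str.isIn t (pvBody p.2) = true ∧ PySem.Str.len t < PySem.Str.len (pvBody p.2)) := by
  induction l with
  | nil => simp [dedupeKeepA]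
  | cons p rest ih =>
    obtain ⟨j, c2⟩ := p
    simp only [dedupeKeepA]
    split_ifs with hij hc
    · rw [Bool.and_eq_true, decide_eq_true_eq] at hc
      simp only [false_iff]
      push Not
      exact ⟨(j, c2), List.mem_cons_self, fun h => hij h.symm, hc.1, hc.2⟩
    · rw [Bool.and_eq_true, decide_eq_true_eq] at hc
      rw [ih]
      constructor
      · intro h q hq hqi
        rcases List.mem_cons.mp hq with rfl | hmem
        · simpa using hc
        · exact h q hmem hqi
      · intro h q hq hqi
        exact h q (List.mem_cons_of_mem _ hq) hqi
    · push Not at hij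
      rw [ih]
      constructor
      · intro h q hq hqi
        rcases List.mem_cons.mp hq with rfl | hmem
        · exact absurd hij.symm hqi
        · exact h q hmem hqi
      · intro h q hq hqi
        exact h q (List.mem_cons_of_mem _ hq) hqi

theorem containedB_iff (t : String) (us : List String)
    (h : us.Pairwise (fun a b => PySem.Str.len b ≤ PySem.Str.len a)) :
    dedupeContainedB t us = true ↔
      ∃ u ∈ us, PySem.Str.len t < PySem.Str.len u ∧ PySem.Str.isIn t u = true := by
  induction us with
  | nil => simp [dedupeContainedB]
  | cons u rest ih =>
    rw [List.pairwise_cons] at h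
    obtain ⟨hd, hrest⟩ := h
    simp only [dedupeContainedB]
    split_ifs with h1 h2
    · constructor
      · intro hfalse; cases hfalse
      · rintro ⟨u', hu', hlt, _⟩
        rcases List.mem_cons.mp hu' with rfl | hmem
        · omega
        · have := hd u' hmem; omega
    · simp only [true_iff]
      exact ⟨u, List.mem_cons_self, by omega, h2⟩
    · rw [ih hrest]
      constructor
      · rintro ⟨u', hu', hlt, hin⟩; exact ⟨u', List.mem_cons_of_mem _ hu', hlt, hin⟩
      · rintro ⟨u', hu', hlt, hin⟩
        rcases List.mem_cons.mp hu' with rfl | hmem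
        · exact absurd hin h2
        · exact ⟨u', hmem, hlt, hin⟩

theorem keepA_eq_not_drop (chunks : List String) (i : Int) (c : String)
    (hmem : (i, c) ∈ PySem.List.enumerate chunks) :
    dedupeKeepA i (pvBody c) (PySem.List.enumerate chunks) = !pvDrop chunks c := by
  rw [PySem.List.mem_enumerate_iff] at hmem
  obtain ⟨k, hk, hkp⟩ := hmem
  have hi : i = (k : Int) := by have := congrArg Prod.fst hkp; simpa using this
  have hc : c = chunks[k] := congrArg Prod.snd hkp
  cases hdrop : pvDrop chunks c with
  | true =>
    simp only [Bool.not_true]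
    unfold pvDrop at hdrop
    rw [List.any_eq_true] at hdrop
    obtain ⟨c2, hc2, hcond⟩ := hdrop
    rw [Bool.and_eq_true, decide_eq_true_eq] at hcond
    obtain ⟨j, hj, hcj⟩ := List.mem_iff_getElem.mp hc2
    by_contra hkeep
    rw [Bool.not_eq_false, keepA_iff] at hkeep
    have hmemj : ((j : Int), c2) ∈ PySem.List.enumerate chunks := by
      rw [PySem.List.mem_enumerate_iff]; exact ⟨j, hj, by simp [hcj]⟩
    by_cases hji : (j : Int) = i
    · -- same index: then c2 = c, and the proper-length condition refutes itself
      have hjk : j = k := by omega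
      have hceq : c2 = c := by subst hjk; exact hcj.symm.trans hc.symm
      rw [hceq] at hcond
      exact absurd hcond.2 (lt_irrefl _)
    · exact hkeep _ hmemj hji ⟨hcond.1, hcond.2⟩
  | false =>
    simp only [Bool.not_false]
    unfold pvDrop at hdrop
    rw [List.any_eq_false] at hdrop
    rw [keepA_iff]
    intro p hp _ hcond
    rw [PySem.List.mem_enumerate_iff] at hp
    obtain ⟨m, hm, hpm⟩ := hp
    have hmem2 : p.2 ∈ chunks := by
      have h2 : p.2 = chunks[m] := congrArg Prod.snd hpm
      exact h2 ▸ List.getElem_mem hm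
    have h2 := hdrop p.2 hmem2
    simp only [Bool.and_eq_true, decide_eq_true_eq, not_and] at h2
    exact h2 hcond.1 hcond.2

theorem containedB_eq_drop (chunks : List String) (c : String) :
    dedupeContainedB (pvBody c)
        (PySem.List.sorted (PySem.Set.ofList (chunks.map pvBody)) (fun u => PySem.Str.len u) true)
      = pvDrop chunks c := by
  cases hdrop : pvDrop chunks c with
  | true =>
    unfold pvDrop at hdrop
    rw [List.any_eq_true] at hdrop
    obtain ⟨c2, hc2, hcond⟩ := hdrop
    rw [Bool.and_eq_true, decide_eq_true_eq] at hcond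
    rw [containedB_iff _ _ (PySem.List.sorted_pairwise_rev _ _)]
    refine ⟨pvBody c2, ?_, hcond.2, hcond.1⟩
    rw [PySem.List.mem_sorted, PySem.Set.mem_ofList]
    exact List.mem_map_of_mem hc2
  | false =>
    unfold pvDrop at hdrop
    rw [List.any_eq_false] at hdrop
    by_contra hcon
    rw [Bool.not_eq_false, containedB_iff _ _ (PySem.List.sorted_pairwise_rev _ _)] at hcon
    obtain ⟨u, hu, hlt, hin⟩ := hcon
    rw [PySem.List.mem_sorted, PySem.Set.mem_ofList, List.mem_map] at hu
    obtain ⟨c2, hc2, rfl⟩ := hu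
    have h2 := hdrop c2 hc2
    simp only [Bool.and_eq_true, decide_eq_true_eq, not_and] at h2
    exact h2 hin hlt

theorem dedupeA_eq_filter (chunks : List String) :
    dedupe_substrings chunks = chunks.filter (fun c => !pvDrop chunks c) := by
  unfold dedupe_substrings
  rw [PySem.List.foldl_congr_mem' (PySem.List.enumerate chunks) _
      (fun final p => if (!pvDrop chunks p.2) then final ++ [p.2] else final) []
      (fun p hp acc => by
        simp only
        rw [keepA_eq_not_drop chunks p.1 p.2 (by simpa using hp)])]
  rw [PySem.List.foldl_append_if (fun p => !pvDrop chunks p.2) Prod.snd]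
  rw [List.nil_append]
  have : ∀ l : List (Int × String),
      (l.filter (fun p => !pvDrop chunks p.2)).map Prod.snd
        = (l.map Prod.snd).filter (fun c => !pvDrop chunks c) := by
    intro l; induction l with
    | nil => rfl
    | cons p rest ih =>
      by_cases h : pvDrop chunks p.2 = true <;> simp [h, ih]
  rw [this, PySem.List.map_snd_enumerate]

theorem pv_zip_map_self {α β : Type} (f : α → β) (l : List α) :
    l.zip (l.map f) = l.map (fun x => (x, f x)) := by
  induction l with
  | nil => rfl
  | cons x rest ih => simp [ih]

theorem dedupeB_eq_filter (chunks : List String) :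
    dedupe_substrings_alt chunks = chunks.filter (fun c => !pvDrop chunks c) := by
  unfold dedupe_substrings_alt
  simp only
  have hzip : chunks.zip (chunks.map pvBody) = chunks.map (fun c => (c, pvBody c)) :=
    pv_zip_map_self pvBody chunks
  rw [hzip, List.foldl_map]
  rw [PySem.List.foldl_congr_mem' chunks _
      (fun out c => if (!pvDrop chunks c) then out ++ [c] else out) []
      (fun c _ acc => by
        simp only [containedB_eq_drop chunks c]
        cases pvDrop chunks c <;> rfl)]
  rw [PySem.List.foldl_append_if_eq_filter (fun c => !pvDrop chunks c)]
  simp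

-- ===== VERDICT (by name: the statement is the Claim_ definition above) =====
theorem dedupe_substrings_spec : Claim_equal_dedupe_substrings := by
  intro chunks _
  unfold Spec_dedupe_substrings
  rw [dedupeA_eq_filter, dedupeB_eq_filter]
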